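-- pv_equiv track=rewrite | github.com/Mukthi/helpscript | listrows.py | find_numbers_with_keyword
-- ===== SOURCE A (Python) =====
-- def find_numbers_with_keyword(data, keywords):
--     """
--     Find all numbers where at least one associated copyright statement contains any of the keywords.
--
--     Args:
--         data (dict): JSON data mapping numbers to list of copyright statements
--         keywords (list): List of keywords to search for
--
--     Returns:
--         list: List of numbers with matching copyright statements
--     """
--     matching_numbers = []
--
--     for number, copyright_statements in data.items():
--         for statement in copyright_statements:
--             if any(keyword in statement for keyword in keywords):
--                 matching_numbers.append(number)
--                 break  # Once we find one match, we can move to the next number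
--
--     return matching_numbers
-- ===== SOURCE B (Python) =====
-- def find_numbers_with_keyword(data, keywords):
--     # Keyword-outer worklist: each keyword is run over only the still-unmatched
--     # entries; matched numbers leave the worklist; data order is restored at the end.
--     matched = set()
--     remaining = list(data.items())
--     for keyword in keywords:
--         if not remaining:
--             break
--         still_unmatched = []
--         for number, statements in remaining:
--             if any(keyword in s for s in statements):
--                 matched.add(number)
--             else:
--                 still_unmatched.append((number, statements))
--         remaining = still_unmatched
--     return [number for number in data if number in matched]
-- ===== Notes on version B (the rewrite author's own statement) =====
-- stated objective: alternative
-- what changed: B interchanges the loops (keyword-outer instead of number-outer): each keyword is matched against a shrinking worklist of still-unmatched entries, matched numbers are collected in a set, and data order is restored by a final pass; Pre_ excludes association lists with duplicate keys, which cannot arise from a Python dict and on which the two traversal orders legitimately differ.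
import Mathlib
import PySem

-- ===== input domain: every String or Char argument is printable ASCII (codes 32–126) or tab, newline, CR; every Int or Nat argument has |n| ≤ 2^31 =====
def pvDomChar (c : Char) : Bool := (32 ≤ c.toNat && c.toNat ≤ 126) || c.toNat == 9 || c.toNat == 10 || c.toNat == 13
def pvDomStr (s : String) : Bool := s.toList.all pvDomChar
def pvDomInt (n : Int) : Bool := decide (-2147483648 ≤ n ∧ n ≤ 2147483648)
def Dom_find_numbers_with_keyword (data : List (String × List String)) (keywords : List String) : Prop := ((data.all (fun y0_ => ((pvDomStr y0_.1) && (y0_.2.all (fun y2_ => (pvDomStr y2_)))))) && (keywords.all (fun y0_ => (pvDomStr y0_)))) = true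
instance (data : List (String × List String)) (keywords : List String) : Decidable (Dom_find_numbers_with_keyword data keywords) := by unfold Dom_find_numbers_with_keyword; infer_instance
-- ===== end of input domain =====

-- B replaces A's number-outer scan-with-break by a keyword-outer pass over a shrinking worklist of unmatched entries (alternative structure, same results on duplicate-free keys).

-- ===== PORT A =====
-- inner 'for statement in copyright_statements: if any(...): append; break'
def pvAInner (number : String) (stmts : List String) (keywords : List String)
    (acc : List String) : List String :=
  match stmts with
  | [] => acc
  | s :: rest =>
    if keywords.any (fun k => PySem.Str.isIn k s) then acc ++ [number]
    else pvAInner number rest keywords acc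

def find_numbers_with_keyword (data : List (String × List String)) (keywords : List String) : List String :=
  data.foldl (fun acc p => pvAInner p.1 p.2 keywords acc) []

-- ===== PORT B =====
-- inner 'for number, statements in remaining: ...' building (matched, still_unmatched)
def pvBPass (k : String) (remaining : List (String × List String))
    (matched : PySem.Set String) (still : List (String × List String)) :
    PySem.Set String × List (String × List String) :=
  match remaining with
  | [] => (matched, still)
  | p :: rest =>
    if p.2.any (fun s => PySem.Str.isIn k s)
    then pvBPass k rest (PySem.Set.add matched p.1) still
    else pvBPass k rest matched (still ++ [p])

-- outer 'for keyword in keywords: if not remaining: break; ...'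
def pvBOuter (kws : List String) (matched : PySem.Set String)
    (remaining : List (String × List String)) : PySem.Set String :=
  match kws with
  | [] => matched
  | k :: rest =>
    if remaining = [] then matched
    else
      let st := pvBPass k remaining matched []
      pvBOuter rest st.1 st.2

def find_numbers_with_keyword_alt (data : List (String × List String)) (keywords : List String) : List String :=
  let matched := pvBOuter keywords PySem.Set.empty data
  (data.filter (fun p => PySem.Set.contains matched p.1)).map (fun p => p.1)

-- ===== PRECONDITION & SPEC =====
-- Pre_ excludes association lists with duplicate keys: a Python dict cannot contain
-- them, and on such lists the two traversal orders legitimately disagree.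
def Pre_find_numbers_with_keyword (data : List (String × List String)) (keywords : List String) : Prop :=
  (data.map (fun p => p.1)).Nodup
instance (data : List (String × List String)) (keywords : List String) : Decidable (Pre_find_numbers_with_keyword data keywords) := by unfold Pre_find_numbers_with_keyword; infer_instance

def pvWitness_find_numbers_with_keyword : (List (String × List String)) × List String :=
  ([("1", ["Copyright Acme"]), ("2", ["none"])], ["Acme"])

def Spec_find_numbers_with_keyword (data : List (String × List String)) (keywords : List String) (out : List String) : Prop := out = find_numbers_with_keyword_alt data keywords
instance (data : List (String × List String)) (keywords : List String) (out : List String) : Decidable (Spec_find_numbers_with_keyword data keywords out) := by unfold Spec_find_numbers_with_keyword; infer_instance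

-- ===== CLAIM (what is proved, stated in full; the proofs are below) =====
def Claim_equal_find_numbers_with_keyword : Prop := ∀ (data : List (String × List String)) (keywords : List String), Dom_find_numbers_with_keyword data keywords → Pre_find_numbers_with_keyword data keywords → Spec_find_numbers_with_keyword data keywords (find_numbers_with_keyword data keywords)

-- ===== LEMMAS AND PROOFS =====

-- A's inner loop appends the number exactly when some statement matches some keyword.
theorem pvAInner_eq (number : String) (stmts keywords : List String) (acc : List String) :
    pvAInner number stmts keywords acc =
      if stmts.any (fun s => keywords.any (fun k => PySem.Str.isIn k s))
      then acc ++ [number] else acc := by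
  induction stmts with
  | nil => simp [pvAInner]
  | cons s rest ih =>
    simp only [pvAInner, List.any_cons, ih, Bool.or_eq_true, List.any_eq_true]
    by_cases h1 : ∃ x ∈ keywords, PySem.Chars.isIn x.toList s.toList = true <;> simp [h1]

-- one pass of B: the matched set gains exactly the keys the keyword matches
theorem pvBPass_fst_mem (k : String) (remaining : List (String × List String))
    (matched : PySem.Set String) (still : List (String × List String)) (n : String) :
    n ∈ (pvBPass k remaining matched still).1 ↔
      n ∈ matched ∨ ∃ p ∈ remaining, p.1 = n ∧ p.2.any (fun s => PySem.Str.isIn k s) := by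
  induction remaining generalizing matched still with
  | nil => simp [pvBPass]
  | cons p rest ih =>
    rw [pvBPass]
    by_cases hm : (p.2.any fun s => PySem.Str.isIn k s) = true
    · rw [if_pos hm, ih]
      simp only [PySem.Set.mem_add, List.mem_cons, exists_eq_or_imp, hm, and_true]
      tauto
    · rw [if_neg hm, ih]
      simp only [List.mem_cons, exists_eq_or_imp]
      have hmf : (p.2.any fun s => PySem.Str.isIn k s) = false := Bool.eq_false_iff.mpr hm
      rw [hmf]
      simp

-- one pass of B: the surviving worklist is the unmatched suffix of the old one
theorem pvBPass_snd (k : String) (remaining : List (String × List String))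
    (matched : PySem.Set String) (still : List (String × List String)) :
    (pvBPass k remaining matched still).2 =
      still ++ remaining.filter (fun p => !(p.2.any (fun s => PySem.Str.isIn k s))) := by
  induction remaining generalizing matched still with
  | nil => simp [pvBPass]
  | cons p rest ih =>
    rw [pvBPass]
    by_cases hm : (p.2.any fun s => PySem.Str.isIn k s) = true
    · rw [if_pos hm, ih, List.filter_cons]
      have hb : (!(p.2.any fun s => PySem.Str.isIn k s)) = false := by rw [hm]; rfl
      rw [hb]
      simp
    · rw [if_neg hm, ih, List.filter_cons]
      have hb : (!(p.2.any fun s => PySem.Str.isIn k s)) = true := by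
        rw [Bool.eq_false_iff.mpr hm]; rfl
      rw [hb]
      simp

-- membership in B's full matched set
theorem pvBOuter_mem (kws : List String) (matched : PySem.Set String)
    (remaining : List (String × List String)) (n : String) :
    n ∈ pvBOuter kws matched remaining ↔
      n ∈ matched ∨ ∃ k ∈ kws, ∃ p ∈ remaining, p.1 = n ∧ p.2.any (fun s => PySem.Str.isIn k s) := by
  induction kws generalizing matched remaining with
  | nil => simp [pvBOuter]
  | cons k rest ih =>
    rw [pvBOuter]
    by_cases hrem : remaining = []
    · subst hrem; simp
    · rw [if_neg hrem]
      rw [ih, pvBPass_fst_mem, pvBPass_snd, List.nil_append]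
      simp only [List.mem_cons, exists_eq_or_imp, List.mem_filter, Bool.not_eq_true',
        Bool.eq_false_iff]
      constructor
      · rintro ((h | h) | ⟨k', hk', p, ⟨hp, _⟩, h1, h2⟩)
        · exact Or.inl h
        · exact Or.inr (Or.inl h)
        · exact Or.inr (Or.inr ⟨k', hk', p, hp, h1, h2⟩)
      · rintro (h | (h | ⟨k', hk', p, hp, h1, h2⟩))
        · exact Or.inl (Or.inl h)
        · exact Or.inl (Or.inr h)
        · by_cases hpk : (p.2.any fun s => PySem.Str.isIn k s) = true
          · exact Or.inl (Or.inr ⟨p, hp, h1, hpk⟩)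
          · exact Or.inr ⟨k', hk', p, ⟨hp, hpk⟩, h1, h2⟩

-- with Nodup keys, an entry is determined by its key
theorem pv_snd_eq_of_nodup_keys (data : List (String × List String))
    (hnd : (data.map Prod.fst).Nodup) {a : String} {b c : List String}
    (hb : (a, b) ∈ data) (hc : (a, c) ∈ data) : b = c := by
  induction data with
  | nil => simp at hb
  | cons p rest ih =>
    obtain ⟨pa, pb⟩ := p
    simp only [List.map_cons, List.nodup_cons] at hnd
    rcases List.mem_cons.mp hb with hb1 | hb1 <;> rcases List.mem_cons.mp hc with hc1 | hc1
    · injection hb1 with h1 h2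
      injection hc1 with h3 h4
      rw [h2, h4]
    · injection hb1 with h1 h2
      exact absurd (List.mem_map.mpr ⟨(a, c), hc1, h1⟩) hnd.1
    · injection hc1 with h3 h4
      exact absurd (List.mem_map.mpr ⟨(a, b), hb1, h3⟩) hnd.1
    · exact ih hnd.2 hb1 hc1

-- ===== VERDICT (by name: the statement is the Claim_ definition above) =====
theorem find_numbers_with_keyword_spec : Claim_equal_find_numbers_with_keyword := by
  intro data keywords _ hpre
  unfold Spec_find_numbers_with_keyword find_numbers_with_keyword find_numbers_with_keyword_alt
  have hfun : (fun (acc : List String) (p : String × List String) => pvAInner p.1 p.2 keywords acc)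
      = fun acc p => if p.2.any (fun s => keywords.any (fun k => PySem.Str.isIn k s))
        then acc ++ [p.1] else acc := by
    funext acc p; exact pvAInner_eq p.1 p.2 keywords acc
  rw [hfun, PySem.List.foldl_append_if, List.nil_append]
  congr 1
  apply List.filter_congr
  intro p hp
  obtain ⟨p1, p2⟩ := p
  by_cases h : p2.any (fun s => keywords.any (fun k => PySem.Str.isIn k s))
  · simp only [h]
    rcases List.any_eq_true.mp h with ⟨s, hs, hks⟩
    rcases List.any_eq_true.mp hks with ⟨k, hk, hin⟩
    exact ((PySem.Set.contains_iff _ _).mpr ((pvBOuter_mem keywords PySem.Set.empty data p1).mpr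
      (Or.inr ⟨k, hk, (p1, p2), hp, rfl, List.any_eq_true.mpr ⟨s, hs, hin⟩⟩))).symm
  · simp only [h]
    rw [eq_comm, ← Bool.not_eq_true]
    intro hcont
    rcases (pvBOuter_mem keywords PySem.Set.empty data p1).mp
        ((PySem.Set.contains_iff _ _).mp hcont) with h0 | ⟨k, hk, q, hq, hq1, hq2⟩
    · simp [PySem.Set.empty] at h0
    · obtain ⟨q1, q2⟩ := q
      simp only at hq1
      subst hq1
      have hq2eq : q2 = p2 := pv_snd_eq_of_nodup_keys data hpre hq hp
      rcases List.any_eq_true.mp hq2 with ⟨s, hs, hin⟩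
      have hbad : p2.any (fun s => keywords.any (fun k => PySem.Str.isIn k s)) = true :=
        List.any_eq_true.mpr ⟨s, hq2eq ▸ hs, List.any_eq_true.mpr ⟨k, hk, hin⟩⟩
      exact absurd hbad h
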